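-- pv_equiv track=rewrite | github.com/jmasclef/asr_framework | src/asr_framework/asr_analyse.py | asr_extractBagOfWords
-- ===== SOURCE A (Python) =====
-- def asr_extractBagOfWords(sentence_list, center, window_length):
--     start = max(0, (center - int(window_length / 2)))
--     stop = min(len(sentence_list) - 1, center + int(window_length / 2))
--     while ((stop - start) < window_length) and (stop < (len(sentence_list) - 1)):
--         stop += 1
--     while ((stop - start) < window_length) and (start > 0):
--         start -= 1
--     new_sentence = sentence_list.copy()
--     new_sentence.pop(center)
--     return new_sentence[start:stop]
-- ===== SOURCE B (Python) =====
-- def asr_extractBagOfWords(sentence_list, center, window_length):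
--     half = int(window_length / 2)
--     n = len(sentence_list)
--     start0 = max(0, center - half)
--     stop0 = min(n - 1, center + half)
--     stop = max(stop0, min(n - 1, start0 + window_length))
--     start = min(start0, max(0, stop - window_length))
--     new_sentence = sentence_list.copy()
--     new_sentence.pop(center)
--     return new_sentence[start:stop]
-- ===== Notes on version B (the rewrite author's own statement) =====
-- stated objective: simpler
-- what changed: The two while loops that widen the window one step at a time are replaced by closed-form max/min arithmetic computing the final start/stop bounds directly.
import Mathlib
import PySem

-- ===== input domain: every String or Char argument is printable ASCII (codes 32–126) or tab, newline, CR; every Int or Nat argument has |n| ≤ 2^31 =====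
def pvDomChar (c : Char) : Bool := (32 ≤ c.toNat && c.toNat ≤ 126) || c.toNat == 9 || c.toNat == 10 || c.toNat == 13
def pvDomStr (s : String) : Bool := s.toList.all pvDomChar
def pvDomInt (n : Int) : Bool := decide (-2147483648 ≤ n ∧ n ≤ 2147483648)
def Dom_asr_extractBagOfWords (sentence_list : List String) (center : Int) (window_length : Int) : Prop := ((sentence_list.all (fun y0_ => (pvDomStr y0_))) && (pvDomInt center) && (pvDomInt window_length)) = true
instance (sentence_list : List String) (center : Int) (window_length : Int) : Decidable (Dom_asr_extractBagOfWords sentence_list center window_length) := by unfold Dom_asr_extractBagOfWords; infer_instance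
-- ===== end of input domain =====

-- B replaces A's two step-by-step window-widening while loops with closed-form max/min bound arithmetic (objective: simpler).

-- ===== PORT A =====
-- while ((stop - start) < window_length) and (stop < (len(sentence_list) - 1)): stop += 1
def pvStopLoop (n start wl stop : Int) : Int :=
  if stop - start < wl ∧ stop < n - 1 then pvStopLoop n start wl (stop + 1) else stop
termination_by (n - 1 - stop).toNat
decreasing_by omega

-- while ((stop - start) < window_length) and (start > 0): start -= 1
def pvStartLoop (stop wl start : Int) : Int :=
  if stop - start < wl ∧ start > 0 then pvStartLoop stop wl (start - 1) else start
termination_by start.toNat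
decreasing_by omega

def asr_extractBagOfWords (sentence_list : List String) (center : Int) (window_length : Int) : List String :=
  let half := PySem.Int.truncdiv window_length 2          -- int(window_length / 2)
  let start0 := max 0 (center - half)
  let stop0 := min ((sentence_list.length : Int) - 1) (center + half)
  let stop := pvStopLoop (sentence_list.length : Int) start0 window_length stop0
  let start := pvStartLoop stop window_length start0
  match PySem.List.pop? sentence_list center with        -- new_sentence.pop(center); raises outside Pre_
  | some (_, rest) => PySem.List.slice rest (some start) (some stop)
  | none => []

-- ===== PORT B =====
def asr_extractBagOfWords_alt (sentence_list : List String) (center : Int) (window_length : Int) : List String :=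
  let half := PySem.Int.truncdiv window_length 2
  let n : Int := sentence_list.length
  let start0 := max 0 (center - half)
  let stop0 := min (n - 1) (center + half)
  let stop := max stop0 (min (n - 1) (start0 + window_length))
  let start := min start0 (max 0 (stop - window_length))
  match PySem.List.pop? sentence_list center with
  | some (_, rest) => PySem.List.slice rest (some start) (some stop)
  | none => []

-- ===== PRECONDITION & SPEC =====
-- A raises IndexError from new_sentence.pop(center) exactly when center is out of Python's index range.
def Pre_asr_extractBagOfWords (sentence_list : List String) (center : Int) (window_length : Int) : Prop :=
  -(sentence_list.length : Int) ≤ center ∧ center < sentence_list.length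
instance (sentence_list : List String) (center : Int) (window_length : Int) : Decidable (Pre_asr_extractBagOfWords sentence_list center window_length) := by unfold Pre_asr_extractBagOfWords; infer_instance

def pvWitness_asr_extractBagOfWords : List String × Int × Int := (["a", "b", "c", "d"], 1, 2)

def Spec_asr_extractBagOfWords (sentence_list : List String) (center : Int) (window_length : Int) (out : List String) : Prop := out = asr_extractBagOfWords_alt sentence_list center window_length
instance (sentence_list : List String) (center : Int) (window_length : Int) (out : List String) : Decidable (Spec_asr_extractBagOfWords sentence_list center window_length out) := by unfold Spec_asr_extractBagOfWords; infer_instance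

-- ===== CLAIM (what is proved, stated in full; the proofs are below) =====
def Claim_equal_asr_extractBagOfWords : Prop := ∀ (sentence_list : List String) (center : Int) (window_length : Int), Dom_asr_extractBagOfWords sentence_list center window_length → Pre_asr_extractBagOfWords sentence_list center window_length → Spec_asr_extractBagOfWords sentence_list center window_length (asr_extractBagOfWords sentence_list center window_length)

-- ===== LEMMAS AND PROOFS =====

-- The stop-widening loop reaches exactly max stop (min (n-1) (start+wl)).
theorem pvStopLoop_eq (n start wl stop : Int) :
    pvStopLoop n start wl stop = max stop (min (n - 1) (start + wl)) := by
  fun_induction pvStopLoop n start wl stop with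
  | case1 _ h ih => rw [ih]; omega
  | case2 _ h => omega

-- The start-widening loop reaches exactly min start (max 0 (stop-wl)).
theorem pvStartLoop_eq (stop wl start : Int) :
    pvStartLoop stop wl start = min start (max 0 (stop - wl)) := by
  fun_induction pvStartLoop stop wl start with
  | case1 _ h ih => rw [ih]; omega
  | case2 _ h => omega

-- ===== VERDICT (by name: the statement is the Claim_ definition above) =====
theorem asr_extractBagOfWords_spec : Claim_equal_asr_extractBagOfWords := by
  intro sentence_list center window_length _ _
  unfold Spec_asr_extractBagOfWords asr_extractBagOfWords asr_extractBagOfWords_alt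
  simp only [pvStopLoop_eq, pvStartLoop_eq]
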